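-- pv_equiv track=rewrite | github.com/ikokkari/PythonProblems | labs109.py | words_with_given_shape
-- ===== SOURCE A (Python) =====
-- def words_with_given_shape(words, shape):
--     result = []
--     for word in words:
--         if len(word) == len(shape) + 1:
--             for i in range(len(word) - 1):
--                 sign = ord(word[i+1]) - ord(word[i])
--                 if (sign < 0 and shape[i] != -1) or (sign == 0 and shape[i] != 0) or (sign > 0 and shape[i] != 1):
--                     break
--             else:
--                 result.append(word)
--     return result
-- ===== SOURCE B (Python) =====
-- def words_with_given_shape(words, shape):
--     # Staged sieve: keep words of the right length, then for each shape
--     # position filter the surviving candidates by that single comparison.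
--     cands = [w for w in words if len(w) == len(shape) + 1]
--     for i, s in enumerate(shape):
--         cands = [w for w in cands if ((w[i+1] > w[i]) - (w[i+1] < w[i])) == s]
--     return cands
-- ===== Notes on version B (the rewrite author's own statement) =====
-- stated objective: alternative
-- what changed: Replaces A's per-word inner compare-and-break loop with a staged sieve: one length pass, then an outer loop over shape positions that each filters the whole surviving candidate list by a single comparison, so no per-word inner scan remains.
import Mathlib
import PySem

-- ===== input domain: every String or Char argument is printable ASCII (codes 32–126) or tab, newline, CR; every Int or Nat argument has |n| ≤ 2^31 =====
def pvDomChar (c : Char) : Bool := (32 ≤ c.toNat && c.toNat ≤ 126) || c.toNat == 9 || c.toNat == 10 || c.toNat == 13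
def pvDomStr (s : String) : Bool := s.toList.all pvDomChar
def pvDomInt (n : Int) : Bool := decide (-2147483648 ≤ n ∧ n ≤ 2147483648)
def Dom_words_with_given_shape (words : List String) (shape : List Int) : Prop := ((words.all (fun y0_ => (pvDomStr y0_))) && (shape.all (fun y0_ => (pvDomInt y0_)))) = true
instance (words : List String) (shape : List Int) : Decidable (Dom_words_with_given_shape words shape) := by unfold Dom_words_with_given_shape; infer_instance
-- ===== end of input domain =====

-- B is a staged sieve: one length pass, then one filtering pass over the surviving
-- candidates per shape position; same asymptotic cost as A, different decomposition.

-- ===== PORT A =====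
-- inner 'for i in range(len(word)-1): … break / else: append' loop of A
def pvShapeLoopA (cs : List Char) (shape : List Int) (i : Nat) : Bool :=
  if i < cs.length - 1 then
    let sign : Int := ((cs.getD (i+1) ' ').toNat : Int) - ((cs.getD i ' ').toNat : Int)
    if (sign < 0 ∧ shape.getD i 0 ≠ -1) ∨ (sign = 0 ∧ shape.getD i 0 ≠ 0) ∨
       (sign > 0 ∧ shape.getD i 0 ≠ 1) then
      false
    else
      pvShapeLoopA cs shape (i+1)
  else true
termination_by cs.length - 1 - i

def words_with_given_shape (words : List String) (shape : List Int) : List String :=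
  words.foldl
    (fun result word =>
      if word.toList.length = shape.length + 1 then
        if pvShapeLoopA word.toList shape 0 then result ++ [word] else result
      else result)
    []

-- ===== PORT B =====
-- (w[i+1] > w[i]) - (w[i+1] < w[i]); single-char Python strings compare by code point
def pvSign (a b : Char) : Int :=
  (if a.toNat < b.toNat then 1 else 0) - (if b.toNat < a.toNat then 1 else 0)

-- Indexing via getD is exact here: every surviving candidate has length shape.length+1,
-- so w[i] and w[i+1] are in range for every enumerated position i of shape.
def words_with_given_shape_alt (words : List String) (shape : List Int) : List String :=
  (PySem.List.enumerate shape).foldl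
    (fun cands p =>
      cands.filter (fun w => pvSign (w.toList.getD p.1.toNat ' ')
                                    (w.toList.getD (p.1.toNat + 1) ' ') == p.2))
    (words.filter (fun w => w.toList.length == shape.length + 1))

-- ===== PRECONDITION & SPEC =====
def Spec_words_with_given_shape (words : List String) (shape : List Int) (out : List String) : Prop := out = words_with_given_shape_alt words shape
instance (words : List String) (shape : List Int) (out : List String) : Decidable (Spec_words_with_given_shape words shape out) := by unfold Spec_words_with_given_shape; infer_instance

-- ===== CLAIM (what is proved, stated in full; the proofs are below) =====
def Claim_equal_words_with_given_shape : Prop := ∀ (words : List String) (shape : List Int), Dom_words_with_given_shape words shape → Spec_words_with_given_shape words shape (words_with_given_shape words shape)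

-- ===== LEMMAS AND PROOFS =====

-- A's break condition fires exactly when the pair's sign differs from shape[i]
theorem break_iff (a b : Char) (s : Int) :
    ((((b.toNat : Int) - (a.toNat : Int)) < 0 ∧ s ≠ -1) ∨
     (((b.toNat : Int) - (a.toNat : Int)) = 0 ∧ s ≠ 0) ∨
     (((b.toNat : Int) - (a.toNat : Int)) > 0 ∧ s ≠ 1)) ↔ pvSign a b ≠ s := by
  unfold pvSign
  rcases Nat.lt_trichotomy a.toNat b.toNat with h | h | h <;>
    simp [h, Nat.lt_asymm] <;> omega

-- A's inner loop succeeds iff every remaining position matches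
theorem loopA_iff (cs : List Char) (shape : List Int) (hlen : cs.length = shape.length + 1)
    (i : Nat) :
    pvShapeLoopA cs shape i = true ↔
      ∀ k, i ≤ k → k < shape.length →
        pvSign (cs.getD k ' ') (cs.getD (k+1) ' ') = shape.getD k 0 := by
  rw [pvShapeLoopA]
  by_cases h : i < cs.length - 1
  · rw [if_pos h]
    by_cases hb : pvSign (cs.getD i ' ') (cs.getD (i+1) ' ') = shape.getD i 0
    · rw [if_neg (by rw [break_iff]; simp only [ne_eq, not_not]; exact hb),
          loopA_iff cs shape hlen (i+1)]
      constructor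
      · intro hrest k hik hk
        rcases Nat.eq_or_lt_of_le hik with rfl | hlt
        · exact hb
        · exact hrest k hlt hk
      · intro hall k hik hk; exact hall k (by omega) hk
    · rw [if_pos (by rw [break_iff]; exact hb)]
      constructor
      · intro hf; exact absurd hf (by simp)
      · intro hall; exact absurd (hall i le_rfl (by omega)) hb
  · rw [if_neg h]
    constructor
    · intro _ k hik hk; omega
    · intro _; rfl
termination_by cs.length - 1 - i

-- B's enumerated-all test, as a Bool
def pvAllB (cs : List Char) (shape : List Int) : Bool :=
  (PySem.List.enumerate shape).all
    (fun p => pvSign (cs.getD p.1.toNat ' ') (cs.getD (p.1.toNat + 1) ' ') == p.2)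

theorem allB_iff (cs : List Char) (shape : List Int) :
    pvAllB cs shape = true ↔
      ∀ k, 0 ≤ k → k < shape.length →
        pvSign (cs.getD k ' ') (cs.getD (k+1) ' ') = shape.getD k 0 := by
  unfold pvAllB
  rw [List.all_eq_true]
  constructor
  · intro hall k _ hk
    have hmem : ((0 : Int) + (k : Int), shape[k]) ∈ PySem.List.enumerate shape 0 :=
      (PySem.List.mem_enumerate_iff _ _ _).mpr ⟨k, hk, rfl⟩
    have h2 := hall _ hmem
    simp only [beq_iff_eq] at h2
    rw [List.getD_eq_getElem _ _ hk]
    simpa using h2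
  · intro hall p hp
    rcases (PySem.List.mem_enumerate_iff _ _ _).mp hp with ⟨k, hk, rfl⟩
    simp only [beq_iff_eq]
    have h2 := hall k (by omega) hk
    rw [List.getD_eq_getElem _ _ hk] at h2
    simpa using h2

-- the two per-word tests agree on words of the right length
theorem loopA_eq_allB (w : String) (shape : List Int)
    (hlen : w.toList.length = shape.length + 1) :
    pvShapeLoopA w.toList shape 0 = pvAllB w.toList shape := by
  apply Bool.coe_iff_coe.mp
  rw [loopA_iff w.toList shape hlen 0, allB_iff]

-- a staged sieve of filters is one filter by the conjunction of all stages
theorem foldl_filter_all {α β : Type} (l : List β) (p : β → α → Bool) (c : List α) :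
    l.foldl (fun cands e => cands.filter (p e)) c
      = c.filter (fun w => l.all (fun e => p e w)) := by
  induction l generalizing c with
  | nil => simp
  | cons e l ih =>
    simp only [List.foldl_cons, ih, List.filter_filter, List.all_cons]
    apply List.filter_congr
    intro w _
    exact Bool.and_comm _ _

-- A's fold is a filter by length-and-loop
theorem foldA_eq_filter (shape : List Int) (ws : List String) (acc : List String) :
    ws.foldl
      (fun result word =>
        if word.toList.length = shape.length + 1 then
          if pvShapeLoopA word.toList shape 0 then result ++ [word] else result
        else result) acc
    = acc ++ ws.filter
        (fun w => w.toList.length == shape.length + 1 && pvShapeLoopA w.toList shape 0) := by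
  induction ws generalizing acc with
  | nil => simp
  | cons w ws ih =>
    simp only [List.foldl_cons, List.filter_cons]
    by_cases hl : w.toList.length = shape.length + 1
    · rw [if_pos hl]
      by_cases hb : pvShapeLoopA w.toList shape 0 = true
      · rw [if_pos hb,
            if_pos (by simp only [Bool.and_eq_true, beq_iff_eq]; exact ⟨hl, hb⟩), ih]
        simp
      · rw [if_neg hb,
            if_neg (by simp only [Bool.and_eq_true, beq_iff_eq]
                       exact fun h => hb h.2), ih]
    · rw [if_neg hl,
          if_neg (by simp only [Bool.and_eq_true, beq_iff_eq]
                     exact fun h => hl h.1), ih]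

-- ===== VERDICT (by name: the statement is the Claim_ definition above) =====
theorem words_with_given_shape_spec : Claim_equal_words_with_given_shape := by
  intro words shape _
  unfold Spec_words_with_given_shape words_with_given_shape words_with_given_shape_alt
  have hB := foldl_filter_all (PySem.List.enumerate shape)
      (fun p w => pvSign (w.toList.getD p.1.toNat ' ')
                         (w.toList.getD (p.1.toNat + 1) ' ') == p.2)
      (words.filter (fun w => w.toList.length == shape.length + 1))
  rw [foldA_eq_filter, List.nil_append, hB, List.filter_filter]
  apply List.filter_congr
  intro w _
  show (w.toList.length == shape.length + 1 && pvShapeLoopA w.toList shape 0)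
      = (pvAllB w.toList shape && (w.toList.length == shape.length + 1))
  by_cases hl : w.toList.length = shape.length + 1
  · have h1 : (w.toList.length == shape.length + 1) = true := by simp [hl]
    rw [h1, loopA_eq_allB w shape hl, Bool.true_and, Bool.and_true]
  · have hl2 : ¬ w.length = shape.length + 1 := by
      rwa [String.length_toList] at hl
    have h1 : (w.toList.length == shape.length + 1) = false := by simp [hl2]
    rw [h1, Bool.false_and, Bool.and_false]
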